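-- pv_equiv track=rewrite | github.com/LuMo25/Project | Crypto/chiffreDePlayfayr.py | SPACEBigramme
-- ===== SOURCE A (Python) =====
-- def SPACEBigramme(S):
--     taille=len(S)//2
--     chaine=[0]*taille
--     x=0
--     for i in range(0,taille):
--         chaine[i]=S[x]+(S[x+1])
--         x=x+2
--     return chaine
-- ===== SOURCE B (Python) =====
-- def SPACEBigramme(S):
--     it = iter(S)
--     return [a + b for a, b in zip(it, it)]
-- ===== Notes on version B (the rewrite author's own statement) =====
-- stated objective: idiomatic
-- what changed: Replaces the preallocated [0]*n list filled by an explicit index-stepping loop (x += 2) with the idiomatic iterator-pairing comprehension zip(it, it), which consumes the string two characters at a time and drops a trailing odd character naturally.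
import Mathlib
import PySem

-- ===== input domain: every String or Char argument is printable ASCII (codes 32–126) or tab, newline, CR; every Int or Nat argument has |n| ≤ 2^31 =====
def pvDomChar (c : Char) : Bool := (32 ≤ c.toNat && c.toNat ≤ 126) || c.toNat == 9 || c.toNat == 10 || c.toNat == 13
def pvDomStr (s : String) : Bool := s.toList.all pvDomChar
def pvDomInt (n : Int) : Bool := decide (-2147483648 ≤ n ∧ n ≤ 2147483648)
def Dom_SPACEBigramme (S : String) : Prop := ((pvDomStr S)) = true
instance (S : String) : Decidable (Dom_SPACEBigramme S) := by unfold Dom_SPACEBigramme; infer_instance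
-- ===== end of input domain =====

-- B replaces A's preallocated list filled by an index-stepping loop with the idiomatic
-- iterator-pairing zip(it, it) comprehension; same return value, no speed claim.

-- ===== PORT A =====
-- [0]*taille holds int placeholders that are ALL overwritten before return; we use ""
-- as the placeholder of type String.  S[x] / S[x+1] always succeed in A (x+1 < 2*(len//2) ≤ len),
-- so '.getD' defaults are never taken and the port is exact.
def SPACEBigramme (S : String) : List String :=
  let taille : Int := PySem.Int.floordiv (PySem.Str.len S) 2
  let chaine : List String := List.replicate taille.toNat ""
  let st := (PySem.List.pyRange 0 taille 1).foldl
    (fun (p : List String × Int) i =>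
      (p.1.set i.toNat
         (String.ofList [(PySem.Str.pyGet? S p.2).getD ' ', (PySem.Str.pyGet? S (p.2 + 1)).getD ' ']),
       p.2 + 2))
    (chaine, 0)
  st.1

-- ===== PORT B =====
-- zip(it, it) on the same iterator consumes the string two characters at a time:
-- structurally, recursion taking two leading characters per step.
def pvPairs : List Char → List String
  | a :: b :: rest => String.ofList [a, b] :: pvPairs rest
  | _ => []

def SPACEBigramme_alt (S : String) : List String := pvPairs S.toList

-- ===== PRECONDITION & SPEC =====
def Spec_SPACEBigramme (S : String) (out : List String) : Prop := out = SPACEBigramme_alt S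
instance (S : String) (out : List String) : Decidable (Spec_SPACEBigramme S out) := by unfold Spec_SPACEBigramme; infer_instance

-- ===== CLAIM (what is proved, stated in full; the proofs are below) =====
def Claim_equal_SPACEBigramme : Prop := ∀ (S : String), Dom_SPACEBigramme S → Spec_SPACEBigramme S (SPACEBigramme S)

-- ===== LEMMAS AND PROOFS =====

theorem pvPairs_length (l : List Char) : (pvPairs l).length = l.length / 2 := by
  induction l using pvPairs.induct with
  | case1 a b rest ih => simp [pvPairs, ih]; omega
  | case2 l h => cases l with
    | nil => simp [pvPairs]
    | cons a t =>
      cases t with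
      | nil => simp [pvPairs]
      | cons b r => exact absurd rfl (h a b r)

theorem pvPairs_append (Y Z : List Char) (h : Y.length % 2 = 0) :
    pvPairs (Y ++ Z) = pvPairs Y ++ pvPairs Z := by
  induction Y using pvPairs.induct with
  | case1 a b rest ih =>
      simp only [List.cons_append, pvPairs, List.length_cons] at *
      rw [ih (by omega)]
  | case2 l hl =>
      cases l with
      | nil => simp [pvPairs]
      | cons a t =>
        cases t with
        | nil => simp at h
        | cons b r => exact absurd rfl (hl a b r)

theorem pvPairs_take_even (l : List Char) : pvPairs (l.take (2 * (l.length / 2))) = pvPairs l := by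
  induction l using pvPairs.induct with
  | case1 a b rest ih =>
      have : (2 * ((a :: b :: rest).length / 2)) = (2 * (rest.length / 2)) + 2 := by
        simp; omega
      rw [this]
      simp only [List.take_succ_cons, pvPairs]
      rw [ih]
  | case2 l h =>
      cases l with
      | nil => simp
      | cons a t =>
        cases t with
        | nil => simp [pvPairs]
        | cons b r => exact absurd rfl (h a b r)

-- the loop invariant of A: after the first j iterations, the first j cells hold the
-- bigrams of the first 2*j characters, the rest are still placeholders, and x = 2*j.
theorem pvLoopInv (S : String) (tN : Nat) (h2 : 2 * tN ≤ S.toList.length) (j : Nat) (hj : j ≤ tN) :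
    (PySem.List.pyRange 0 (j : Int) 1).foldl
      (fun (p : List String × Int) i =>
        (p.1.set i.toNat
           (String.ofList [(PySem.Str.pyGet? S p.2).getD ' ', (PySem.Str.pyGet? S (p.2 + 1)).getD ' ']),
         p.2 + 2))
      (List.replicate tN "", 0)
    = (pvPairs (S.toList.take (2 * j)) ++ List.replicate (tN - j) "", ((2 * j : Nat) : Int)) := by
  induction j with
  | zero => simp [PySem.List.pyRange_one_eq_nil, pvPairs]
  | succ j ih =>
      have hj' : j ≤ tN := Nat.le_of_succ_le hj
      have hcast : ((j + 1 : Nat) : Int) = (j : Int) + 1 := by push_cast; ring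
      rw [hcast, PySem.List.pyRange_one_succ_right (by positivity), List.foldl_append, ih hj']
      simp only [List.foldl_cons, List.foldl_nil]
      have hx0 : 2 * j < S.toList.length := by omega
      have hx1 : 2 * j + 1 < S.toList.length := by omega
      have hget0 : (PySem.Str.pyGet? S ((2 * j : Nat) : Int)).getD ' ' = S.toList[2 * j] := by
        rw [PySem.Str.pyGet?_natCast, List.getElem?_eq_getElem hx0]; rfl
      have hget1 : (PySem.Str.pyGet? S (((2 * j : Nat) : Int) + 1)).getD ' ' = S.toList[2 * j + 1] := by
        have : ((2 * j : Nat) : Int) + 1 = ((2 * j + 1 : Nat) : Int) := by push_cast; ring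
        rw [this, PySem.Str.pyGet?_natCast, List.getElem?_eq_getElem hx1]; rfl
      have hlen : (pvPairs (S.toList.take (2 * j))).length = j := by
        rw [pvPairs_length, List.length_take]; omega
      have hrep : List.replicate (tN - j) "" = "" :: List.replicate (tN - (j + 1)) "" := by
        have : tN - j = (tN - (j + 1)) + 1 := by omega
        rw [this, List.replicate_succ]
      have htoNat : ((j : Int)).toNat = j := by simp
      have htake : S.toList.take (2 * (j + 1))
          = S.toList.take (2 * j) ++ [S.toList[2 * j], S.toList[2 * j + 1]] := by
        have e1 : 2 * (j + 1) = (2 * j + 1) + 1 := by ring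
        rw [e1, List.take_add_one, List.take_add_one,
            List.getElem?_eq_getElem hx0, List.getElem?_eq_getElem hx1]
        simp only [Option.toList_some, List.append_assoc, List.singleton_append]
      have hpairs : pvPairs (S.toList.take (2 * (j + 1)))
          = pvPairs (S.toList.take (2 * j)) ++ [String.ofList [S.toList[2 * j], S.toList[2 * j + 1]]] := by
        rw [htake, pvPairs_append _ _ (by rw [List.length_take]; omega)]
        rfl
      refine Prod.ext ?_ (by simp; ring)
      simp only [htoNat, hget0, hget1, hrep]
      rw [List.set_append]
      simp only [hlen, lt_irrefl, if_false, Nat.sub_self, List.set_cons_zero]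
      rw [hpairs]
      simp

theorem pvFloordiv_two (n : Nat) : PySem.Int.floordiv (n : Int) 2 = ((n / 2 : Nat) : Int) := by
  simp [PySem.Int.floordiv, Int.fdiv_eq_ediv]

-- ===== VERDICT (by name: the statement is the Claim_ definition above) =====
theorem SPACEBigramme_spec : Claim_equal_SPACEBigramme := by
  intro S _
  unfold Spec_SPACEBigramme SPACEBigramme SPACEBigramme_alt
  simp only []
  have hL : S.toList.length = S.length := by simp
  have h2 : 2 * (S.length / 2) ≤ S.toList.length := by rw [hL]; omega
  rw [PySem.Str.len_eq, hL, pvFloordiv_two,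
      show (((S.length / 2 : Nat) : Int)).toNat = S.length / 2 by omega,
      pvLoopInv S (S.length / 2) h2 (S.length / 2) le_rfl]
  simp only [Nat.sub_self, List.replicate_zero, List.append_nil]
  rw [← hL]
  exact pvPairs_take_even S.toList
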